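-- pv_equiv track=rewrite | github.com/simigami/oneM2M_Elevator_Digital_Twin | Resources/Simulator/Behavior_Pattern2.py | find_closest_floors
-- ===== SOURCE A (Python) =====
-- def find_closest_floors(alts_dict, current_altitude):
--     closest_floors = {
--         'upper_floor': None,
--         'lower_floor': None
--     }
--     closest_upper_diff = float('inf')
--     closest_lower_diff = float('inf')
--
--     for floor, altitude in alts_dict.items():
--         diff = current_altitude - altitude
--
--         if diff < 0 and abs(diff) < closest_upper_diff:
--             closest_upper_diff = abs(diff)
--             closest_floors['upper_floor'] = floor
--
--         elif diff > 0 and abs(diff) < closest_lower_diff: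
--             closest_lower_diff = abs(diff)
--             closest_floors['lower_floor'] = floor
--
--         elif diff == 0: ## if diff is 0
--             closest_floors['upper_floor'] = floor
--             closest_floors['lower_floor'] = floor
--
--             break
--
--     return closest_floors
-- ===== SOURCE B (Python) =====
-- def find_closest_floors(alts_dict, current_altitude):
--     # Exact match: first floor at the current altitude wins both slots.
--     for floor, altitude in alts_dict.items():
--         if altitude == current_altitude:
--             return {'upper_floor': floor, 'lower_floor': floor}
--     above = [(f, a) for f, a in alts_dict.items() if a > current_altitude]
--     below = [(f, a) for f, a in alts_dict.items() if a < current_altitude]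
--     upper = min(above, key=lambda fa: fa[1])[0] if above else None
--     lower = max(below, key=lambda fa: fa[1])[0] if below else None
--     return {'upper_floor': upper, 'lower_floor': lower}
-- ===== Notes on version B (the rewrite author's own statement) =====
-- stated objective: simpler
-- what changed: Replaces A's single stateful scan (two running best-diff accumulators with a break) by a prescan for an exact altitude match followed by min/max reductions over the strictly-above and strictly-below candidates, which keep the first extremal floor exactly like A's strict-improvement updates.
import Mathlib
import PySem

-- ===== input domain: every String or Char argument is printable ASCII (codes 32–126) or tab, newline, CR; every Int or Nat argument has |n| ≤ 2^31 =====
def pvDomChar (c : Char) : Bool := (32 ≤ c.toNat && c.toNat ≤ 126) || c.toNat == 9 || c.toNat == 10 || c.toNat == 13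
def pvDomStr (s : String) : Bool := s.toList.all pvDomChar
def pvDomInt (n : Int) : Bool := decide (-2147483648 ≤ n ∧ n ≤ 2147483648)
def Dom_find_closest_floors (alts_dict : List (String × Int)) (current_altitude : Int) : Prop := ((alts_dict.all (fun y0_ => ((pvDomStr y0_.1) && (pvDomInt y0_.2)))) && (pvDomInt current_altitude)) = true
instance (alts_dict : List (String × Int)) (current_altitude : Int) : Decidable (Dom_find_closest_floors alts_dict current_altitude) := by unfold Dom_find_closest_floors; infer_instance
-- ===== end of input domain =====

-- B replaces A's single stateful scan (break + two best-diff accumulators) by an exact-match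
-- prescan followed by first-wins min/max reductions over the above/below candidates (objective: simpler).


-- ===== PORT A =====
-- float('inf') is only ever compared against |diff|: the accumulators are `Option Int` with `none` = inf.
def pvLtInf (d : Int) (o : Option Int) : Bool :=
  match o with
  | none => true
  | some x => decide (d < x)

-- A's for-loop with its mutable state (upper/lower floor, the two best diffs) and the `break`.
def pvLoopA (ca : Int) (up lo : Option String) (ud ld : Option Int) :
    List (String × Int) → Option String × Option String
  | [] => (up, lo)
  | (floor, altitude) :: rest =>
    let diff := ca - altitude
    if diff < 0 && pvLtInf (-diff) ud then
      pvLoopA ca (some floor) lo (some (-diff)) ld rest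
    else if diff > 0 && pvLtInf diff ld then
      pvLoopA ca up (some floor) ud (some diff) rest
    else if diff = 0 then
      (some floor, some floor)   -- sets both keys and breaks
    else
      pvLoopA ca up lo ud ld rest

def find_closest_floors (alts_dict : List (String × Int)) (current_altitude : Int) : List (String × Option String) :=
  let r := pvLoopA current_altitude none none none none alts_dict
  [("upper_floor", r.1), ("lower_floor", r.2)]

-- ===== PORT B =====
-- port of Python's min(l, key=altitude) / max(l, key=altitude): first extremal element.
def pvMinByAlt (l : List (String × Int)) : Option (String × Int) :=
  l.foldl (fun acc p => match acc with
    | none => some p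
    | some q => if p.2 < q.2 then some p else some q) none

def pvMaxByAlt (l : List (String × Int)) : Option (String × Int) :=
  l.foldl (fun acc p => match acc with
    | none => some p
    | some q => if q.2 < p.2 then some p else some q) none

def find_closest_floors_alt (alts_dict : List (String × Int)) (current_altitude : Int) : List (String × Option String) :=
  match alts_dict.find? (fun p => p.2 == current_altitude) with
  | some (floor, _) => [("upper_floor", some floor), ("lower_floor", some floor)]
  | none =>
    let above := alts_dict.filter (fun p => decide (p.2 > current_altitude))
    let below := alts_dict.filter (fun p => decide (p.2 < current_altitude))
    [("upper_floor", (pvMinByAlt above).map Prod.fst),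
     ("lower_floor", (pvMaxByAlt below).map Prod.fst)]

-- ===== PRECONDITION & SPEC =====
def Spec_find_closest_floors (alts_dict : List (String × Int)) (current_altitude : Int) (out : List (String × Option String)) : Prop := out = find_closest_floors_alt alts_dict current_altitude
instance (alts_dict : List (String × Int)) (current_altitude : Int) (out : List (String × Option String)) : Decidable (Spec_find_closest_floors alts_dict current_altitude out) := by unfold Spec_find_closest_floors; infer_instance

-- ===== CLAIM (what is proved, stated in full; the proofs are below) =====
def Claim_equal_find_closest_floors : Prop := ∀ (alts_dict : List (String × Int)) (current_altitude : Int), Dom_find_closest_floors alts_dict current_altitude → Spec_find_closest_floors alts_dict current_altitude (find_closest_floors alts_dict current_altitude)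

-- ===== LEMMAS AND PROOFS =====

-- Loop invariant: with A's accumulators decoded from optional best (floor, altitude) pairs
-- (upper best diff = alt - ca, lower best diff = ca - alt), A's loop computes exactly B's
-- find?/min/max combination seeded with those pairs.
theorem pvLoopA_eq (ca : Int) (xs : List (String × Int)) :
    ∀ (bu bl : Option (String × Int)),
    pvLoopA ca (bu.map Prod.fst) (bl.map Prod.fst)
      (bu.map (fun p => p.2 - ca)) (bl.map (fun p => ca - p.2)) xs =
    (match xs.find? (fun p => p.2 == ca) with
    | some q => (some q.1, some q.1)
    | none =>
      (((xs.filter (fun p => decide (p.2 > ca))).foldl (fun acc p => match acc with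
            | none => some p
            | some q => if p.2 < q.2 then some p else some q) bu).map Prod.fst,
       ((xs.filter (fun p => decide (p.2 < ca))).foldl (fun acc p => match acc with
            | none => some p
            | some q => if q.2 < p.2 then some p else some q) bl).map Prod.fst)) := by
  induction xs with
  | nil => intro bu bl; rfl
  | cons hd tl ih =>
    intro bu bl
    obtain ⟨f, alt⟩ := hd
    rcases lt_trichotomy alt ca with h | h | h
    · -- strictly below: lower-side candidate
      cases bl with
      | none =>
        have hrec := ih bu (some (f, alt))
        simp only [pvLoopA, pvLtInf, List.find?, List.filter_cons] at *
        simp only [show ((alt : Int) == ca) = false by simpa using (by omega : alt ≠ ca),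
          show decide (ca - alt < 0) = false by simp; omega,
          show decide (0 < ca - alt) = true by simp; omega,
          show decide (alt > ca) = false by simp; omega,
          show decide (alt < ca) = true by simp; omega,
          Bool.false_and, Bool.true_and, if_false, if_true, Option.map_some, Option.map_none] at *
        simpa using hrec
      | some q =>
        by_cases h2 : ca - alt < ca - q.2
        · have hrec := ih bu (some (f, alt))
          simp only [pvLoopA, pvLtInf, List.find?, List.filter_cons] at *
          simp only [show ((alt : Int) == ca) = false by simpa using (by omega : alt ≠ ca),
            show decide (ca - alt < 0) = false by simp; omega,
            show decide (0 < ca - alt) = true by simp; omega,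
            show decide (ca - alt < ca - q.2) = true by simp; omega,
            if_pos (show q.2 < alt by omega),
            show decide (alt > ca) = false by simp; omega,
            show decide (alt < ca) = true by simp; omega,
            Bool.false_and, Bool.true_and, Bool.and_true, if_false, if_true,
            Option.map_some, Option.map_none] at *
          simp only [Bool.false_eq_true, eq_self_iff_true, if_true, if_false, List.foldl_cons, if_pos (show q.2 < alt by omega)]
          simpa using hrec
        · have hrec := ih bu (some q)
          simp only [pvLoopA, pvLtInf, List.find?, List.filter_cons] at *
          simp only [show ((alt : Int) == ca) = false by simpa using (by omega : alt ≠ ca),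
            show decide (ca - alt < 0) = false by simp; omega,
            show decide (ca - alt < ca - q.2) = false by simp; omega,
            show decide (ca - alt = 0) = false by simp; omega,
            if_neg (show ¬ q.2 < alt by omega),
            show decide (alt > ca) = false by simp; omega,
            show decide (alt < ca) = true by simp; omega,
            Bool.false_and, Bool.true_and, Bool.and_false, if_false, if_true,
            Option.map_some, Option.map_none] at *
          simp only [Bool.false_eq_true, eq_self_iff_true, if_true, if_false, List.foldl_cons, if_neg (show ¬ (ca - alt = 0) by omega), if_neg (show ¬ q.2 < alt by omega)]
          simpa using hrec
    · -- exact match: both slots get this floor and the loop breaks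
      subst h
      simp [pvLoopA, pvLtInf, List.find?]
    · -- strictly above: upper-side candidate
      cases bu with
      | none =>
        have hrec := ih (some (f, alt)) bl
        simp only [pvLoopA, pvLtInf, List.find?, List.filter_cons] at *
        simp only [show ((alt : Int) == ca) = false by simpa using (by omega : alt ≠ ca),
          show decide (ca - alt < 0) = true by simp; omega,
          show decide (alt > ca) = true by simp; omega,
          show decide (alt < ca) = false by simp; omega,
          show -(ca - alt) = alt - ca by ring,
          Bool.true_and, if_true, Option.map_some, Option.map_none] at *
        simpa using hrec
      | some q =>
        by_cases h2 : alt - ca < q.2 - ca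
        · have hrec := ih (some (f, alt)) bl
          simp only [pvLoopA, pvLtInf, List.find?, List.filter_cons] at *
          simp only [show ((alt : Int) == ca) = false by simpa using (by omega : alt ≠ ca),
            show decide (ca - alt < 0) = true by simp; omega,
            show -(ca - alt) = alt - ca by ring,
            show decide (alt - ca < q.2 - ca) = true by simp; omega,
            if_pos (show alt < q.2 by omega),
            show decide (alt > ca) = true by simp; omega,
            show decide (alt < ca) = false by simp; omega,
            Bool.true_and, Bool.and_true, if_true, Option.map_some, Option.map_none] at *
          simp only [Bool.false_eq_true, eq_self_iff_true, if_true, if_false, List.foldl_cons, if_pos (show alt < q.2 by omega)]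
          simpa using hrec
        · have hrec := ih (some q) bl
          simp only [pvLoopA, pvLtInf, List.find?, List.filter_cons] at *
          simp only [show ((alt : Int) == ca) = false by simpa using (by omega : alt ≠ ca),
            show decide (ca - alt < 0) = true by simp; omega,
            show decide (0 < ca - alt) = false by simp; omega,
            show decide (ca - alt = 0) = false by simp; omega,
            show -(ca - alt) = alt - ca by ring,
            show decide (alt - ca < q.2 - ca) = false by simp; omega,
            if_neg (show ¬ alt < q.2 by omega),
            show decide (alt > ca) = true by simp; omega,
            show decide (alt < ca) = false by simp; omega,
            Bool.true_and, Bool.false_and, Bool.and_false, if_false,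
            Option.map_some, Option.map_none] at *
          simp only [Bool.false_eq_true, eq_self_iff_true, if_true, if_false, List.foldl_cons, if_neg (show ¬ (ca - alt = 0) by omega), if_neg (show ¬ alt < q.2 by omega)]
          simpa using hrec


theorem find_closest_floors_spec : Claim_equal_find_closest_floors := by
  intro alts ca _
  unfold Spec_find_closest_floors find_closest_floors find_closest_floors_alt pvMinByAlt pvMaxByAlt
  have h := pvLoopA_eq ca alts none none
  simp only [Option.map_none] at h
  rw [h]
  cases hf : alts.find? (fun p => p.2 == ca) with
  | none => simp
  | some q => simp
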